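-- pv_equiv track=rewrite | github.com/ZilongJi/2D2P | utils_analysis.py | get_indices_circle
-- ===== SOURCE A (Python) =====
-- def get_indices_circle(i, j, r, n_bins_z, n_bins_x):
--     """
--     get the indices of the circle with center (i,j) and radius r
--     """
--     #initialize the indices
--     ind = []
--     #for each row, get the indices of the circle
--     for row in range(i-r, i+r+1):
--         #for each column, get the indices of the circle
--         for col in range(j-r, j+r+1):
--             #if the point is within the circle, then append the index to ind
--             if (row-i)**2+(col-j)**2 <= r**2:
--                 #if the point is out of the matrix, then skip
--                 if row<0 or row>=n_bins_z or col<0 or col>=n_bins_x: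
--                     continue
--                 else:
--                     ind.append((row, col))
--     return ind
-- ===== SOURCE B (Python) =====
-- def _isqrt(n):
--     # largest d >= 0 with d*d <= n (n >= 0)
--     d = 0
--     while (d + 1) * (d + 1) <= n:
--         d += 1
--     return d
--
-- def get_indices_circle(i, j, r, n_bins_z, n_bins_x):
--     ind = []
--     for row in range(i - r, i + r + 1):
--         if 0 <= row < n_bins_z:
--             d = _isqrt(r * r - (row - i) * (row - i))
--             for col in range(max(j - d, 0), min(j + d, n_bins_x - 1) + 1):
--                 ind.append((row, col))
--     return ind
-- ===== Notes on version B (the rewrite author's own statement) =====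
-- stated objective: alternative
-- what changed: The per-cell circle-membership test over the full (2r+1)x(2r+1) bounding box is replaced by computing, for each row, the exact column span via an integer square root and emitting the clipped interval directly, skipping out-of-range rows entirely.
import Mathlib
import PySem

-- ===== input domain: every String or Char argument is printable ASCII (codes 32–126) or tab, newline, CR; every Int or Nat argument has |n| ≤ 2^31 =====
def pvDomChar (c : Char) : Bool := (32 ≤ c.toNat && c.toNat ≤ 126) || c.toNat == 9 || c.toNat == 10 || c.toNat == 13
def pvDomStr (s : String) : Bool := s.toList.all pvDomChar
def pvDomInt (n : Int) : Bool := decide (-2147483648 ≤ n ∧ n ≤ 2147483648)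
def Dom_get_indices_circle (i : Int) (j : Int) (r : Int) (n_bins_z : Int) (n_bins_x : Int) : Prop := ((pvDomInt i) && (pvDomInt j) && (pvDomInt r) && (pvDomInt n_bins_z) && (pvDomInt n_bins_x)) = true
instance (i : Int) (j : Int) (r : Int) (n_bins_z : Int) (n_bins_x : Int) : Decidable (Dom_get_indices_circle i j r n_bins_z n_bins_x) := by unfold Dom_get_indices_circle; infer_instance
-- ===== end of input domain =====

-- B replaces the per-cell circle test over the bounding box by a per-row closed-form
-- column span (integer square root), emitting the clipped interval directly (objective: alternative).

-- ===== PORT A =====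
def get_indices_circle (i : Int) (j : Int) (r : Int) (n_bins_z : Int) (n_bins_x : Int) : List (Int × Int) :=
  (PySem.List.pyRange (i - r) (i + r + 1) 1).foldl (fun ind row =>
    (PySem.List.pyRange (j - r) (j + r + 1) 1).foldl (fun ind col =>
      if (row - i) ^ 2 + (col - j) ^ 2 ≤ r ^ 2 then
        if row < 0 ∨ row ≥ n_bins_z ∨ col < 0 ∨ col ≥ n_bins_x then ind
        else ind ++ [(row, col)]
      else ind) ind) []

-- ===== PORT B =====
-- Source B's _isqrt: increment d while (d+1)*(d+1) <= n; the Nat fuel (n.toNat + 1) is only a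
-- totality device — the loop stops before exhausting it whenever 0 ≤ n (pvIsqrtAux_spec).
def pvIsqrtAux (n : Int) : Nat → Int → Int
  | 0, d => d
  | fuel + 1, d => if (d + 1) * (d + 1) ≤ n then pvIsqrtAux n fuel (d + 1) else d

def pvIsqrt (n : Int) : Int := pvIsqrtAux n (n.toNat + 1) 0

def get_indices_circle_alt (i : Int) (j : Int) (r : Int) (n_bins_z : Int) (n_bins_x : Int) : List (Int × Int) :=
  (PySem.List.pyRange (i - r) (i + r + 1) 1).foldl (fun ind row =>
    if 0 ≤ row ∧ row < n_bins_z then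
      let d := pvIsqrt (r * r - (row - i) * (row - i))
      (PySem.List.pyRange (max (j - d) 0) (min (j + d) (n_bins_x - 1) + 1) 1).foldl
        (fun ind col => ind ++ [(row, col)]) ind
    else ind) []

-- ===== PRECONDITION & SPEC =====
def Spec_get_indices_circle (i : Int) (j : Int) (r : Int) (n_bins_z : Int) (n_bins_x : Int) (out : List (Int × Int)) : Prop := out = get_indices_circle_alt i j r n_bins_z n_bins_x
instance (i : Int) (j : Int) (r : Int) (n_bins_z : Int) (n_bins_x : Int) (out : List (Int × Int)) : Decidable (Spec_get_indices_circle i j r n_bins_z n_bins_x out) := by unfold Spec_get_indices_circle; infer_instance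

-- ===== CLAIM (what is proved, stated in full; the proofs are below) =====
def Claim_equal_get_indices_circle : Prop := ∀ (i : Int) (j : Int) (r : Int) (n_bins_z : Int) (n_bins_x : Int), Dom_get_indices_circle i j r n_bins_z n_bins_x → Spec_get_indices_circle i j r n_bins_z n_bins_x (get_indices_circle i j r n_bins_z n_bins_x)

-- ===== LEMMAS AND PROOFS =====

-- _isqrt loop invariant: with enough fuel the loop returns the integer square root bracket.
theorem pvIsqrtAux_spec (n : Int) : ∀ (fuel : Nat) (d : Int), 0 ≤ d → d * d ≤ n →
    n < (d + fuel) * (d + fuel) →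
    0 ≤ pvIsqrtAux n fuel d ∧ pvIsqrtAux n fuel d * pvIsqrtAux n fuel d ≤ n ∧
      n < (pvIsqrtAux n fuel d + 1) * (pvIsqrtAux n fuel d + 1) := by
  intro fuel
  induction fuel with
  | zero => intro d hd hdn hlt; simp at hlt; exact absurd hdn (by nlinarith)
  | succ fuel ih =>
    intro d hd hdn hlt
    simp only [pvIsqrtAux]
    split
    · exact ih (d + 1) (by omega) (by assumption) (by push_cast at hlt ⊢; nlinarith [hlt])
    · exact ⟨hd, hdn, by omega⟩

theorem pvIsqrt_spec (n : Int) (hn : 0 ≤ n) :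
    0 ≤ pvIsqrt n ∧ pvIsqrt n * pvIsqrt n ≤ n ∧ n < (pvIsqrt n + 1) * (pvIsqrt n + 1) := by
  have h := pvIsqrtAux_spec n (n.toNat + 1) 0 le_rfl (by nlinarith) (by push_cast; nlinarith [Int.toNat_of_nonneg hn])
  exact h

-- filter of an interval by interval membership is the subinterval
theorem filter_pyRange_interval (a b lo hi : Int) (h1 : a ≤ lo) (h2 : hi < b) :
    (PySem.List.pyRange a b 1).filter (fun x => decide (lo ≤ x ∧ x ≤ hi)) =
      PySem.List.pyRange lo (hi + 1) 1 := by
  by_cases hlh : hi < lo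
  · have hnil : PySem.List.pyRange lo (hi + 1) 1 = [] := PySem.List.pyRange_one_eq_nil (by omega)
    rw [hnil]
    refine List.filter_eq_nil_iff.mpr ?_
    intro x _
    simp only [decide_eq_true_eq]
    omega
  · rw [PySem.List.pyRange_one_append a lo b (by omega) (by omega),
        PySem.List.pyRange_one_append lo (hi + 1) b (by omega) (by omega),
        List.filter_append, List.filter_append]
    have e1 : (PySem.List.pyRange a lo 1).filter (fun x => decide (lo ≤ x ∧ x ≤ hi)) = [] := by
      refine List.filter_eq_nil_iff.mpr ?_
      intro x hx
      have := PySem.List.mem_pyRange_one.mp hx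
      simp only [decide_eq_true_eq]; omega
    have e2 : (PySem.List.pyRange (hi + 1) b 1).filter (fun x => decide (lo ≤ x ∧ x ≤ hi)) = [] := by
      refine List.filter_eq_nil_iff.mpr ?_
      intro x hx
      have := PySem.List.mem_pyRange_one.mp hx
      simp only [decide_eq_true_eq]; omega
    have e3 : (PySem.List.pyRange lo (hi + 1) 1).filter (fun x => decide (lo ≤ x ∧ x ≤ hi)) =
        PySem.List.pyRange lo (hi + 1) 1 := by
      refine List.filter_eq_self.mpr ?_
      intro x hx
      have := PySem.List.mem_pyRange_one.mp hx
      simp only [decide_eq_true_eq]; omega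
    rw [e1, e2, e3, List.nil_append, List.append_nil]

-- per-row: A's filtered column scan equals B's clipped closed-form span
theorem row_core (i j r n_bins_z n_bins_x row : Int) (hr1 : i - r ≤ row) (hr2 : row < i + r + 1) :
    ((PySem.List.pyRange (j - r) (j + r + 1) 1).filter
        (fun col => decide ((row - i) ^ 2 + (col - j) ^ 2 ≤ r ^ 2 ∧
          ¬(row < 0 ∨ row ≥ n_bins_z ∨ col < 0 ∨ col ≥ n_bins_x)))).map (fun col => (row, col)) =
      (if 0 ≤ row ∧ row < n_bins_z then
        (PySem.List.pyRange (max (j - pvIsqrt (r * r - (row - i) * (row - i))) 0)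
          (min (j + pvIsqrt (r * r - (row - i) * (row - i))) (n_bins_x - 1) + 1) 1).map
            (fun col => (row, col))
      else []) := by
  by_cases hb : 0 ≤ row ∧ row < n_bins_z
  · rw [if_pos hb]
    set s : Int := r * r - (row - i) * (row - i) with hs
    have hr0 : 0 ≤ r := by omega
    have hsn : 0 ≤ s := by rw [hs]; nlinarith
    obtain ⟨hd0, hd1, hd2⟩ := pvIsqrt_spec s hsn
    set d : Int := pvIsqrt s with hdd
    have hdr : d ≤ r := by nlinarith
    congr 1
    have hcong : (PySem.List.pyRange (j - r) (j + r + 1) 1).filter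
        (fun col => decide ((row - i) ^ 2 + (col - j) ^ 2 ≤ r ^ 2 ∧
          ¬(row < 0 ∨ row ≥ n_bins_z ∨ col < 0 ∨ col ≥ n_bins_x))) =
        (PySem.List.pyRange (j - r) (j + r + 1) 1).filter
        (fun col => decide (max (j - d) 0 ≤ col ∧ col ≤ min (j + d) (n_bins_x - 1))) := by
      refine List.filter_congr ?_
      intro col _
      simp only [decide_eq_decide]
      constructor
      · rintro ⟨hcirc, hnb⟩
        push Not at hnb
        have hsq : (col - j) * (col - j) ≤ s := by rw [hs]; nlinarith [sq_nonneg (row - i), hcirc]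
        have habs : -d ≤ col - j ∧ col - j ≤ d := by
          constructor <;> by_contra hc <;> push Not at hc <;> nlinarith
        omega
      · rintro ⟨hlo, hhi⟩
        have h1 : -d ≤ col - j := by omega
        have h2 : col - j ≤ d := by omega
        have hsq : (col - j) * (col - j) ≤ d * d := by nlinarith
        refine ⟨by nlinarith, ?_⟩
        push Not
        omega
    rw [hcong]
    exact filter_pyRange_interval (j - r) (j + r + 1) (max (j - d) 0)
      (min (j + d) (n_bins_x - 1)) (by omega) (by omega)
  · rw [if_neg hb]
    have : (PySem.List.pyRange (j - r) (j + r + 1) 1).filter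
        (fun col => decide ((row - i) ^ 2 + (col - j) ^ 2 ≤ r ^ 2 ∧
          ¬(row < 0 ∨ row ≥ n_bins_z ∨ col < 0 ∨ col ≥ n_bins_x))) = [] := by
      refine List.filter_eq_nil_iff.mpr ?_
      intro x _
      simp only [decide_eq_true_eq]
      rintro ⟨-, hnb⟩
      push Not at hnb
      omega
    rw [this, List.map_nil]

-- ===== VERDICT (by name: the statement is the Claim_ definition above) =====
theorem get_indices_circle_spec : Claim_equal_get_indices_circle := by
  intro i j r n_bins_z n_bins_x _
  unfold Spec_get_indices_circle get_indices_circle get_indices_circle_alt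
  refine PySem.List.foldl_congr_mem _ _ _ _ ?_
  intro ind row hrow
  obtain ⟨hr1, hr2⟩ := PySem.List.mem_pyRange_one.mp hrow
  have hA : (PySem.List.pyRange (j - r) (j + r + 1) 1).foldl (fun ind col =>
      if (row - i) ^ 2 + (col - j) ^ 2 ≤ r ^ 2 then
        if row < 0 ∨ row ≥ n_bins_z ∨ col < 0 ∨ col ≥ n_bins_x then ind
        else ind ++ [(row, col)]
      else ind) ind =
      ind ++ ((PySem.List.pyRange (j - r) (j + r + 1) 1).filter
        (fun col => decide ((row - i) ^ 2 + (col - j) ^ 2 ≤ r ^ 2 ∧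
          ¬(row < 0 ∨ row ≥ n_bins_z ∨ col < 0 ∨ col ≥ n_bins_x)))).map (fun col => (row, col)) := by
    rw [← PySem.List.foldl_append_if]
    refine PySem.List.foldl_congr_mem _ _ _ _ ?_
    intro acc col _
    by_cases h1 : (row - i) ^ 2 + (col - j) ^ 2 ≤ r ^ 2 <;>
      by_cases h2 : row < 0 ∨ row ≥ n_bins_z ∨ col < 0 ∨ col ≥ n_bins_x <;>
      simp [h1, h2]
  rw [hA, row_core i j r n_bins_z n_bins_x row hr1 hr2]
  by_cases hb : 0 ≤ row ∧ row < n_bins_z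
  · rw [if_pos hb, if_pos hb]
    rw [PySem.List.foldl_append_singleton_eq_map]
  · rw [if_neg hb, if_neg hb, List.append_nil]
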